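-- pv_equiv track=rewrite | github.com/Difio3333/Python-DAU | main.py | create_dorian_scale
-- ===== SOURCE A (Python) =====
-- def create_dorian_scale(note):
-- 	note -= 24
--
-- 	scale=[]
--
-- 	majorscale = [2,1,2,2,2,1,2]
-- 	i = 0
-- 	while i < 5:
-- 		z = 0
-- 		while z < len(majorscale):
-- 			note += majorscale[z]
-- 			scale.append(note)
-- 			z+=1
-- 		i+=1
--
-- 	return scale
-- ===== SOURCE B (Python) =====
-- def create_dorian_scale(note):
--     base = note - 24
--     offsets = [2, 3, 5, 7, 9, 10, 12]
--     return [base + 12 * i + o for i in range(5) for o in offsets]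
-- ===== Notes on version B (the rewrite author's own statement) =====
-- stated objective: simpler
-- what changed: Replaced the nested accumulate-and-mutate while loops by a single comprehension computing each note independently as base + 12*octave + precomputed prefix-sum offset.
import Mathlib
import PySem

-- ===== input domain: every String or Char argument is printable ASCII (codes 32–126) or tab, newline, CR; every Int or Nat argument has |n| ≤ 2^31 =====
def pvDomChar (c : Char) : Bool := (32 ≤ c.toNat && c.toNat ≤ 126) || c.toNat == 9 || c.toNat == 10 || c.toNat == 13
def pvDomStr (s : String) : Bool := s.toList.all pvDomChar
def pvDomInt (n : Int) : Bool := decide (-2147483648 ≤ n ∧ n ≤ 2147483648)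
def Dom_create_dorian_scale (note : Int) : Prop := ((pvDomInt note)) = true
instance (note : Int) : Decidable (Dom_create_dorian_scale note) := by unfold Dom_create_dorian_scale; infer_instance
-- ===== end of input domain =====

-- B replaces A's nested accumulate-and-mutate loops with a closed-form comprehension
-- (base + 12*octave + prefix-sum offset); objective: simpler.

-- ===== PORT A =====
-- A: note -= 24, then 5 passes over majorscale, appending a running accumulator.
def create_dorian_scale (note : Int) : List Int :=
  let note := note - 24
  let majorscale : List Int := [2, 1, 2, 2, 2, 1, 2]
  let st := (List.range 5).foldl
    (fun (st : List Int × Int) _ =>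
      majorscale.foldl (fun (st2 : List Int × Int) m =>
        (st2.1 ++ [st2.2 + m], st2.2 + m)) st)
    ([], note)
  st.1

-- ===== PORT B =====
def create_dorian_scale_alt (note : Int) : List Int :=
  let base := note - 24
  let offsets : List Int := [2, 3, 5, 7, 9, 10, 12]
  (List.range 5).flatMap (fun i => offsets.map (fun o => base + 12 * (i : Int) + o))

-- ===== PRECONDITION & SPEC =====
def Spec_create_dorian_scale (note : Int) (out : List Int) : Prop := out = create_dorian_scale_alt note
instance (note : Int) (out : List Int) : Decidable (Spec_create_dorian_scale note out) := by unfold Spec_create_dorian_scale; infer_instance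

-- ===== CLAIM (what is proved, stated in full; the proofs are below) =====
def Claim_equal_create_dorian_scale : Prop := ∀ (note : Int), Dom_create_dorian_scale note → Spec_create_dorian_scale note (create_dorian_scale note)

-- ===== LEMMAS AND PROOFS =====

-- ===== VERDICT (by name: the statement is the Claim_ definition above) =====
theorem create_dorian_scale_spec : Claim_equal_create_dorian_scale := by
  intro note _
  unfold Spec_create_dorian_scale create_dorian_scale create_dorian_scale_alt
  simp [List.range_succ, List.foldl, List.flatMap, List.map]
  omega
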